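-- pv_equiv track=rewrite | github.com/smitjethwa/python_solutions | tcs-nqt/nqt3.py | compute
-- ===== SOURCE A (Python) =====
-- def compute(n):
-- 	even = 0
-- 	odd = 0
-- 	series = []
-- 	for i in range(0,n):
-- 		if (i%2 == 0):
-- 			series.append(pow(2,even))
-- 			even += 1
-- 		elif (i%2 != 0):
-- 			series.append(pow(3,odd))
-- 			odd += 1
-- 	return(series)
-- ===== SOURCE B (Python) =====
-- def compute(n):
--     m = max(n, 0)
--     twos = [2 ** k for k in range((m + 1) // 2)]
--     threes = [3 ** k for k in range(m // 2)]
--     out = []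
--     for a, b in zip(twos, threes):
--         out.extend((a, b))
--     if m % 2:
--         out.append(2 ** (m // 2))
--     return out
-- ===== Notes on version B (the rewrite author's own statement) =====
-- stated objective: alternative
-- what changed: Replaces the single branchy loop with parity counters by building the powers-of-two and powers-of-three strands independently with closed-form counts and interleaving them via zip, appending the trailing extra power of two when the length is odd.
import Mathlib
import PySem

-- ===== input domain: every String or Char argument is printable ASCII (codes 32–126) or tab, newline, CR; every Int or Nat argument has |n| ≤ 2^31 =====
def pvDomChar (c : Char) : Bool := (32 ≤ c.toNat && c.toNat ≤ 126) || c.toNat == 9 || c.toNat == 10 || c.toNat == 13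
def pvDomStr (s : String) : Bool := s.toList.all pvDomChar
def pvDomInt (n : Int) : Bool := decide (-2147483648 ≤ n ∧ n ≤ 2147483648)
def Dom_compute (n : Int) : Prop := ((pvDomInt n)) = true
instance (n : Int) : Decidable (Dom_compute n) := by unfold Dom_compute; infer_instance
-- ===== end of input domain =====

-- B builds the powers-of-2 and powers-of-3 strands separately and interleaves them (alternative decomposition, same cost).

-- ===== PORT A =====
-- Literal port of A's loop: state (even, odd, series); pow(2, even) with the
-- nonnegative counter 'even' is exactly 2 ^ even.toNat.
def compute (n : Int) : List Int :=
  (((PySem.List.pyRange 0 n 1).foldl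
    (fun (st : Int × Int × List Int) i =>
      if PySem.Int.mod i 2 == 0 then
        (st.1 + 1, st.2.1, st.2.2 ++ [(2 : Int) ^ st.1.toNat])
      else
        (st.1, st.2.1 + 1, st.2.2 ++ [(3 : Int) ^ st.2.1.toNat]))
    (0, 0, []))).2.2

-- ===== PORT B =====
-- Literal port of Source B: two comprehensions over range((m+1)//2) / range(m//2),
-- a zip-interleave fold, and the trailing power of 2 when m is odd.
def compute_alt (n : Int) : List Int :=
  let m : Int := max n 0
  let twos := (List.range (PySem.Int.floordiv (m + 1) 2).toNat).map (fun k => (2 : Int) ^ k)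
  let threes := (List.range (PySem.Int.floordiv m 2).toNat).map (fun k => (3 : Int) ^ k)
  let out := (twos.zip threes).foldl (fun acc p => acc ++ [p.1, p.2]) []
  if PySem.Int.mod m 2 ≠ 0 then out ++ [(2 : Int) ^ (PySem.Int.floordiv m 2).toNat] else out

-- ===== PRECONDITION & SPEC =====
def Spec_compute (n : Int) (out : List Int) : Prop := out = compute_alt n
instance (n : Int) (out : List Int) : Decidable (Spec_compute n out) := by unfold Spec_compute; infer_instance

-- ===== CLAIM (what is proved, stated in full; the proofs are below) =====
def Claim_equal_compute : Prop := ∀ (n : Int), Dom_compute n → Spec_compute n (compute n)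

-- ===== LEMMAS AND PROOFS =====

-- the common description of the series
def pvL (k : Nat) : List Int :=
  (List.range k).map (fun i => if i % 2 = 0 then (2 : Int) ^ (i / 2) else (3 : Int) ^ (i / 2))

theorem pvL_succ (k : Nat) :
    pvL (k + 1) = pvL k ++ [if k % 2 = 0 then (2 : Int) ^ (k / 2) else (3 : Int) ^ (k / 2)] := by
  simp [pvL, List.range_succ]

-- A-side: fold invariant
theorem pvA_fold (k : Nat) :
    (PySem.List.pyRange 0 (k : Int) 1).foldl
      (fun (st : Int × Int × List Int) i =>
        if PySem.Int.mod i 2 == 0 then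
          (st.1 + 1, st.2.1, st.2.2 ++ [(2 : Int) ^ st.1.toNat])
        else
          (st.1, st.2.1 + 1, st.2.2 ++ [(3 : Int) ^ st.2.1.toNat]))
      (0, 0, [])
    = ((((k + 1) / 2 : Nat) : Int), ((k / 2 : Nat) : Int), pvL k) := by
  induction k with
  | zero => simp [PySem.List.pyRange_one_eq_nil, pvL]
  | succ k ih =>
    rw [show ((k + 1 : Nat) : Int) = (k : Int) + 1 by push_cast; ring,
      PySem.List.pyRange_one_succ_right (by positivity), List.foldl_append, ih]
    simp only [List.foldl_cons, List.foldl_nil]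
    by_cases hk : k % 2 = 0
    · have hm : PySem.Int.mod (k : Int) 2 = 0 := by
        rw [PySem.Int.mod_eq_emod_of_pos (by norm_num)]; omega
      rw [hm]
      simp only [show ((0 : Int) == 0) = true from rfl, if_true, Prod.mk.injEq,
        Int.toNat_natCast]
      refine ⟨by omega, by omega, ?_⟩
      rw [pvL_succ, if_pos hk, show (k + 1) / 2 = k / 2 from by omega]
    · have hm : PySem.Int.mod (k : Int) 2 = 1 := by
        rw [PySem.Int.mod_eq_emod_of_pos (by norm_num)]; omega
      rw [hm, if_neg (by decide)]
      simp only [Prod.mk.injEq, Int.toNat_natCast]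
      refine ⟨by omega, by omega, ?_⟩
      rw [pvL_succ, if_neg hk]

theorem pvA_eq (k : Nat) : compute (k : Int) = pvL k := by
  unfold compute
  rw [pvA_fold]

-- B-side: the zip-interleave of equal-length strands
theorem pvInter (j : Nat) :
    ((((List.range j).map (fun k => (2 : Int) ^ k)).zip
        ((List.range j).map (fun k => (3 : Int) ^ k))).foldl
      (fun acc p => acc ++ [p.1, p.2]) [])
    = pvL (2 * j) := by
  induction j with
  | zero => simp [pvL]
  | succ j ih =>
    rw [List.range_succ, List.map_append, List.map_append,
      List.zip_append (by simp), List.foldl_append, ih]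
    rw [show 2 * (j + 1) = (2 * j + 1) + 1 from by ring, pvL_succ, pvL_succ,
      if_pos (by omega), if_neg (by omega),
      show (2 * j) / 2 = j from by omega, show (2 * j + 1) / 2 = j from by omega]
    simp [List.append_assoc]

theorem pvB_eq (k : Nat) : compute_alt (k : Int) = pvL k := by
  unfold compute_alt
  have hmax : max (k : Int) 0 = (k : Int) := by omega
  have hfd1 : (PySem.Int.floordiv ((k : Int) + 1) 2).toNat = (k + 1) / 2 := by
    rw [PySem.Int.floordiv_eq_ediv_of_pos (by norm_num)]; omega
  have hfd2 : (PySem.Int.floordiv (k : Int) 2).toNat = k / 2 := by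
    rw [PySem.Int.floordiv_eq_ediv_of_pos (by norm_num)]; omega
  simp only [hmax, hfd1, hfd2]
  rcases Nat.even_or_odd k with he | ho
  · obtain ⟨j, hj⟩ := he
    have hmod : PySem.Int.mod (k : Int) 2 = 0 := by
      rw [PySem.Int.mod_eq_emod_of_pos (by norm_num)]; omega
    rw [if_neg (by rw [hmod]; simp)]
    rw [show (k + 1) / 2 = j from by omega, show k / 2 = j from by omega, pvInter,
      show 2 * j = k from by omega]
  · obtain ⟨j, hj⟩ := ho
    have hmod : PySem.Int.mod (k : Int) 2 = 1 := by
      rw [PySem.Int.mod_eq_emod_of_pos (by norm_num)]; omega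
    rw [if_pos (by rw [hmod]; norm_num)]
    rw [show (k + 1) / 2 = j + 1 from by omega, show k / 2 = j from by omega]
    rw [List.range_succ, List.map_append,
      show ((List.range j).map (fun k => (3 : Int) ^ k))
        = ((List.range j).map (fun k => (3 : Int) ^ k)) ++ [] from by simp,
      List.zip_append (by simp)]
    simp only [List.zip_nil_right, List.append_nil]
    rw [pvInter, show k = 2 * j + 1 from by omega, pvL_succ, if_pos (by omega),
      show (2 * j) / 2 = j from by omega]

theorem pv_neg (n : Int) (hn : n < 0) : compute n = compute_alt n := by
  unfold compute compute_alt
  rw [PySem.List.pyRange_one_eq_nil (by omega)]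
  have h0 : max n 0 = 0 := by omega
  simp [h0, PySem.Int.floordiv, PySem.Int.mod]

-- ===== VERDICT (by name: the statement is the Claim_ definition above) =====
theorem compute_spec : Claim_equal_compute := by
  intro n _
  unfold Spec_compute
  by_cases h : 0 ≤ n
  · obtain ⟨k, rfl⟩ := Int.eq_ofNat_of_zero_le h
    rw [pvA_eq, pvB_eq]
  · exact pv_neg n (by omega)
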